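-- pv_equiv track=rewrite | github.com/Datus-ai/Datus-agent | datus/utils/reference_paths.py | normalize_reference_path
-- ===== SOURCE A (Python) =====
-- from typing import List
--
-- def normalize_reference_path(path: str) -> str:
--     """
--     Normalize a hierarchical reference path by trimming whitespace, removing trailing punctuation,
--     and unquoting the final component when wrapped in double quotes.
--     """
--     if not path:
--         return ""
--
--     text = path.strip()
--     buffer: List[str] = []
--     in_quotes = False
--     for ch in text:
--         if ch == '"':
--             in_quotes = not in_quotes
--             buffer.append(ch)
--         elif ch.isspace() and not in_quotes:
--             # Stop once we hit whitespace outside of a quoted segment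
--             break
--         else:
--             buffer.append(ch)
--
--     cleaned = "".join(buffer).rstrip(".,;:!?)]}")
--     if not cleaned:
--         return ""
--
--     segments = [segment.strip() for segment in cleaned.split(".")]
--     if not segments:
--         return ""
--
--     last = segments[-1]
--     if last.startswith('"') and last.endswith('"') and len(last) >= 2:
--         last = last[1:-1]
--     segments[-1] = last
--     return ".".join(segments)
-- ===== SOURCE B (Python) =====
-- def _before_space(s):
--     for k, c in enumerate(s):
--         if c.isspace():
--             return s[:k]
--     return s
--
--
-- def _outside(parts):
--     head = _before_space(parts[0])
--     if len(parts) == 1 or len(head) != len(parts[0]):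
--         return head
--     return head + '"' + _inside(parts[1:])
--
--
-- def _inside(parts):
--     if len(parts) == 1:
--         return parts[0]
--     return parts[0] + '"' + _outside(parts[1:])
--
--
-- def normalize_reference_path(path: str) -> str:
--     if not path:
--         return ""
--     cleaned = _outside(path.strip().split('"')).rstrip(".,;:!?)]}")
--     if not cleaned:
--         return ""
--     segs = [seg.strip() for seg in cleaned.split(".")]
--     last = segs[-1]
--     if len(last) >= 2 and last[0] == '"' and last[-1] == '"':
--         segs[-1] = last[1:-1]
--     return ".".join(segs)
-- ===== Notes on version B (the rewrite author's own statement) =====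
-- stated objective: alternative
-- what changed: B replaces A's manual quote-state character loop (toggling in_quotes, appending to a buffer, breaking at unquoted whitespace) by splitting the text at double-quote characters and reassembling the alternating outside/inside-quote segments with a mutually recursive pair, cutting an outside segment at its first whitespace.
import Mathlib
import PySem

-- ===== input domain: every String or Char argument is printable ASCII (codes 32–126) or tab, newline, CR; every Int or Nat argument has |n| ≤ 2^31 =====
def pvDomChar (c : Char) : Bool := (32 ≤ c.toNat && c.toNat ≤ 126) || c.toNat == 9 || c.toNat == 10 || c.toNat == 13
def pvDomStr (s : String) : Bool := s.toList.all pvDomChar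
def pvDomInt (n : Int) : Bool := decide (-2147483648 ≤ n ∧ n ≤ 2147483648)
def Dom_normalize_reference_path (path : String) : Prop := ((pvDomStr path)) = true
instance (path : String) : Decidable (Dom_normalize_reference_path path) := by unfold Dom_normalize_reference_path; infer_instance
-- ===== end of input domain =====

-- B replaces A's manual quote-tracking character loop by splitting on '"' and
-- reassembling the alternating outside/inside segments (objective: alternative).

-- shared port of .rstrip(".,;:!?)]}") (exact: drops trailing chars of that set)
def rstripPunct (cs : List Char) : List Char :=
  (cs.reverse.dropWhile (fun c => c ∈ ['.', ',', ';', ':', '!', '?', ')', ']', '}'])).reverse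

-- ===== PORT A =====
-- one step of A's for-loop; state = (buffer, in_quotes, broken-out-of-loop)
def stepA (s : List Char × Bool × Bool) (ch : Char) : List Char × Bool × Bool :=
  if s.2.2 then s
  else if ch = '"' then (s.1 ++ [ch], !s.2.1, s.2.2)
  else if PySem.Chars.isspace ch && !s.2.1 then (s.1, s.2.1, true)
  else (s.1 ++ [ch], s.2.1, s.2.2)

def normalize_reference_path (path : String) : String :=
  if path = "" then "" else
  let text := PySem.Chars.strip path.toList
  let st := text.foldl stepA ([], false, false)
  let cleaned := rstripPunct st.1
  if cleaned = [] then "" else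
  let segments := (cleaned.splitOn '.').map PySem.Chars.strip  -- exact: single-char sep
  if segments = [] then "" else
  let last0 := segments.getLastD []  -- segments[-1]; in range: guarded by the check above
  let last := if PySem.Chars.startswith last0 ['"'] && PySem.Chars.endswith last0 ['"']
                 && decide (2 ≤ last0.length)
              then PySem.List.slice last0 (some 1) (some (-1)) else last0
  String.ofList (List.intercalate ['.'] (segments.dropLast ++ [last]))  -- exact: ".".join

-- ===== PORT B =====
def beforeSpace : List Char → List Char
  | [] => []
  | c :: cs => if PySem.Chars.isspace c then [] else c :: beforeSpace cs

mutual
-- parts[0] always exists where B calls these (str.split is never empty); [] case unreachable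
def nrpOutside : List (List Char) → List Char
  | [] => []
  | p :: rest =>
    let head := beforeSpace p
    if rest = [] ∨ head.length ≠ p.length then head
    else head ++ '"' :: nrpInside rest
def nrpInside : List (List Char) → List Char
  | [] => []
  | [p] => p
  | p :: rest => p ++ '"' :: nrpOutside rest
end

def normalize_reference_path_alt (path : String) : String :=
  if path = "" then "" else
  let cleaned := rstripPunct (nrpOutside ((PySem.Chars.strip path.toList).splitOn '"'))
  if cleaned = [] then "" else
  let segs := (cleaned.splitOn '.').map PySem.Chars.strip
  let last := segs.getLastD []  -- segs[-1]; segs is never empty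
  String.ofList (List.intercalate ['.']
    (if decide (2 ≤ last.length) && (PySem.List.pyGet? last 0 == some '"')
        && (PySem.List.pyGet? last (-1) == some '"')
     then segs.dropLast ++ [(last.drop 1).dropLast] else segs))

-- ===== PRECONDITION & SPEC =====
def Spec_normalize_reference_path (path : String) (out : String) : Prop := out = normalize_reference_path_alt path
instance (path : String) (out : String) : Decidable (Spec_normalize_reference_path path out) := by unfold Spec_normalize_reference_path; infer_instance

-- ===== CLAIM (what is proved, stated in full; the proofs are below) =====
def Claim_equal_normalize_reference_path : Prop := ∀ (path : String), Dom_normalize_reference_path path → Spec_normalize_reference_path path (normalize_reference_path path)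

-- ===== LEMMAS AND PROOFS =====

-- the common value of A's character loop and B's split/reassemble
def coreLoop : List Char → Bool → List Char
  | [], _ => []
  | c :: cs, b =>
    if c = '"' then c :: coreLoop cs (!b)
    else if PySem.Chars.isspace c && !b then []
    else c :: coreLoop cs b

theorem foldA_broken (cs : List Char) (buf : List Char) (b : Bool) :
    List.foldl stepA (buf, b, true) cs = (buf, b, true) := by
  induction cs with
  | nil => rfl
  | cons c cs ih => simp [stepA, ih]

theorem foldA_eq (cs : List Char) : ∀ (buf : List Char) (b : Bool),
    (List.foldl stepA (buf, b, false) cs).1 = buf ++ coreLoop cs b := by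
  induction cs with
  | nil => intro buf b; simp [coreLoop]
  | cons c cs ih =>
    intro buf b
    by_cases hq : c = '"'
    · simp [stepA, hq, coreLoop, ih]
    · by_cases hs : PySem.Chars.isspace c && !b
      · simp [stepA, hq, hs, coreLoop, foldA_broken]
      · simp [stepA, hq, hs, coreLoop, ih]

theorem nrpInside_cons_cons (c : Char) (p : List Char) (ps : List (List Char)) :
    nrpInside ((c :: p) :: ps) = c :: nrpInside (p :: ps) := by
  cases ps <;> simp [nrpInside]

theorem nrpOutside_cons_cons (c : Char) (p : List Char) (ps : List (List Char))
    (hs : ¬ PySem.Chars.isspace c = true) :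
    nrpOutside ((c :: p) :: ps) = c :: nrpOutside (p :: ps) := by
  rcases ps with _ | ⟨q, qs⟩
  · simp [nrpOutside, beforeSpace, hs]
  · by_cases hlen : (beforeSpace p).length = p.length
    · have hlen' : (beforeSpace (c :: p)).length = (c :: p).length := by
        simp [beforeSpace, hs]
        omega
      simp [nrpOutside, beforeSpace, hs, hlen, hlen']
    · have hlen' : ¬ (beforeSpace (c :: p)).length = (c :: p).length := by
        simp [beforeSpace, hs]
        omega
      simp [nrpOutside, beforeSpace, hs, hlen, hlen']

theorem splitB_eq (cs : List Char) :
    nrpOutside (cs.splitOn '"') = coreLoop cs false ∧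
    nrpInside (cs.splitOn '"') = coreLoop cs true := by
  induction cs with
  | nil => constructor <;> simp [List.splitOn, nrpOutside, nrpInside, beforeSpace, coreLoop]
  | cons c cs ih =>
    obtain ⟨ihO, ihI⟩ := ih
    obtain ⟨p, ps, hps⟩ := List.exists_cons_of_ne_nil (List.splitOnP_ne_nil (· == '"') cs)
    have hsplit : cs.splitOn '"' = p :: ps := hps
    rw [hsplit] at ihO ihI
    by_cases hq : c = '"'
    · subst hq
      have h1 : ('"' :: cs).splitOn '"' = [] :: p :: ps := by
        simp only [List.splitOn] at hsplit ⊢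
        simp [List.splitOnP_cons, hsplit]
      have hO : nrpOutside ([] :: p :: ps) = '"' :: nrpInside (p :: ps) := by
        simp [nrpOutside, beforeSpace]
      have hI : nrpInside ([] :: p :: ps) = '"' :: nrpOutside (p :: ps) := rfl
      constructor
      · rw [h1, hO, ihI]; simp [coreLoop]
      · rw [h1, hI, ihO]; simp [coreLoop]
    · have h1 : (c :: cs).splitOn '"' = (c :: p) :: ps := by
        simp only [List.splitOn] at hsplit ⊢
        simp [List.splitOnP_cons, hq, hsplit]
      by_cases hs : PySem.Chars.isspace c = true
      · constructor
        · have hO : nrpOutside ((c :: p) :: ps) = [] := by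
            simp [nrpOutside, beforeSpace, hs]
          rw [h1, hO]; simp [coreLoop, hq, hs]
        · rw [h1, nrpInside_cons_cons, ihI]
          simp [coreLoop, hq, hs]
      · constructor
        · rw [h1, nrpOutside_cons_cons c p ps hs, ihO]
          simp [coreLoop, hq, hs]
        · rw [h1, nrpInside_cons_cons, ihI]
          simp [coreLoop, hq]

theorem cleaned_eq (cs : List Char) :
    (List.foldl stepA ([], false, false) cs).1 = nrpOutside (cs.splitOn '"') := by
  rw [foldA_eq, (splitB_eq cs).1]; rfl

theorem slice_one_negone (l : List Char) (h : 2 ≤ l.length) :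
    PySem.List.slice l (some 1) (some (-1)) = (l.drop 1).dropLast := by
  have hmin : min 1 l.length = 1 := by omega
  have h1 : PySem.List.slice l (some 1) (some (-1)) = (l.drop 1).take (l.length - 2) := by
    simp only [PySem.List.slice, PySem.List.clampIdx]
    split_ifs <;> try omega
    all_goals
      simp only [Int.toNat_one]
      rw [hmin]
      congr 1
      omega
  rw [h1, List.dropLast_eq_take]
  congr 1
  simp
  omega

theorem pyGet?_zero_eq_head? (l : List Char) : PySem.List.pyGet? l 0 = l.head? := by
  cases l <;> simp [PySem.List.pyGet?, PySem.List.pyIdx?]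

theorem pyGet?_neg_one_eq_getLast? (l : List Char) :
    PySem.List.pyGet? l (-1) = l.getLast? := by
  cases l with
  | nil => simp [PySem.List.pyGet?, PySem.List.pyIdx?]
  | cons x t =>
    simp [PySem.List.pyGet?, PySem.List.pyIdx?, List.getLast?_eq_getElem?]

theorem suffix_singleton_iff (c : Char) (l : List Char) :
    [c] <:+ l ↔ l.getLast? = some c := by
  induction l with
  | nil => simp
  | cons x t ih =>
    cases t with
    | nil => simp [List.suffix_cons_iff, eq_comm]
    | cons y u =>
      rw [List.suffix_cons_iff]
      simp only [List.getLast?_cons_cons]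
      rw [← ih]
      constructor
      · rintro (h | h)
        · exact absurd (congrArg List.length h) (by simp)
        · exact h
      · exact Or.inr

theorem startswith_singleton (l : List Char) (c : Char) :
    PySem.Chars.startswith l [c] = (l.head? == some c) := by
  rw [Bool.eq_iff_iff, PySem.Chars.startswith_iff]
  cases l with
  | nil => simp
  | cons x t =>
    simp [List.cons_prefix_cons]
    exact eq_comm

theorem endswith_singleton (l : List Char) (c : Char) :
    PySem.Chars.endswith l [c] = (l.getLast? == some c) := by
  rw [Bool.eq_iff_iff, PySem.Chars.endswith_iff, suffix_singleton_iff]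
  simp

theorem tail_cond_eq (l : List Char) :
    (PySem.Chars.startswith l ['"'] && PySem.Chars.endswith l ['"'] && decide (2 ≤ l.length))
    = (decide (2 ≤ l.length) && (PySem.List.pyGet? l 0 == some '"')
        && (PySem.List.pyGet? l (-1) == some '"')) := by
  rw [startswith_singleton, endswith_singleton, pyGet?_zero_eq_head?, pyGet?_neg_one_eq_getLast?]
  cases h : decide (2 ≤ l.length) <;> simp

theorem segments_ne_nil (cleaned : List Char) :
    (cleaned.splitOn '.').map PySem.Chars.strip ≠ [] := by
  intro h
  exact List.splitOnP_ne_nil (· == '.') cleaned (List.map_eq_nil_iff.mp h)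

-- ===== VERDICT (by name: the statement is the Claim_ definition above) =====
theorem normalize_reference_path_spec : Claim_equal_normalize_reference_path := by
  intro path _
  unfold Spec_normalize_reference_path
  simp only [normalize_reference_path, normalize_reference_path_alt]
  simp only [cleaned_eq]
  by_cases hp : path = ""
  · simp [hp]
  · rw [if_neg hp, if_neg hp]
    set cleaned := rstripPunct (nrpOutside ((PySem.Chars.strip path.toList).splitOn '"')) with hcl
    by_cases hc : cleaned = []
    · simp [hc]
    · rw [if_neg hc, if_neg hc]
      set segs := (cleaned.splitOn '.').map PySem.Chars.strip with hsegs
      have hne : segs ≠ [] := segments_ne_nil cleaned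
      rw [if_neg hne]
      set l := segs.getLastD [] with hl
      have hlast : l = segs.getLast hne := by
        rw [hl, List.getLastD_eq_getLast?, List.getLast?_eq_some_getLast hne]
        rfl
      rw [tail_cond_eq]
      by_cases hcond : (decide (2 ≤ l.length) && (PySem.List.pyGet? l 0 == some '"')
          && (PySem.List.pyGet? l (-1) == some '"')) = true
      · have h2 : 2 ≤ l.length := by
          rcases Bool.and_eq_true_iff.mp hcond with ⟨h, _⟩
          rcases Bool.and_eq_true_iff.mp h with ⟨h', _⟩
          simpa using h'
        rw [if_pos hcond, if_pos hcond, slice_one_negone l h2]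
      · rw [if_neg hcond, if_neg hcond]
        rw [hlast, List.dropLast_concat_getLast]
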